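-- pv_equiv track=rewrite | github.com/pkurjanowicz/11-sort-contacts | sort_contacts.py | sort_contacts
-- ===== SOURCE A (Python) =====
-- def sort_contacts(dictionary):
--     new_list = []
--     for key in dictionary:
--         sub_list_tuple = ()
--         sub_list_list = list(sub_list_tuple)
--         var1, var2 = dictionary[key]
--         sub_list_list.append(key)
--         sub_list_list.append(var1)
--         sub_list_list.append(var2)
--         sub_list_tuple = tuple(sub_list_list)
--         new_list.append(sub_list_tuple)
--     new_list.sort()
--     return new_list
-- ===== SOURCE B (Python) =====
-- def sort_contacts(dictionary):
--     result = []
--     for key in dictionary: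
--         var1, var2 = dictionary[key]
--         item = (key, var1, var2)
--         i = 0
--         while i < len(result) and result[i] < item:
--             i += 1
--         result.insert(i, item)
--     return result
-- ===== Notes on version B (the rewrite author's own statement) =====
-- stated objective: alternative
-- what changed: B replaces build-all-tuples-then-list.sort() by an incremental insertion sort: for each dict key it builds the tuple and inserts it into its ordered position of the result via a linear scan, so the result is kept sorted at all times and no final sort pass exists.
import Mathlib
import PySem

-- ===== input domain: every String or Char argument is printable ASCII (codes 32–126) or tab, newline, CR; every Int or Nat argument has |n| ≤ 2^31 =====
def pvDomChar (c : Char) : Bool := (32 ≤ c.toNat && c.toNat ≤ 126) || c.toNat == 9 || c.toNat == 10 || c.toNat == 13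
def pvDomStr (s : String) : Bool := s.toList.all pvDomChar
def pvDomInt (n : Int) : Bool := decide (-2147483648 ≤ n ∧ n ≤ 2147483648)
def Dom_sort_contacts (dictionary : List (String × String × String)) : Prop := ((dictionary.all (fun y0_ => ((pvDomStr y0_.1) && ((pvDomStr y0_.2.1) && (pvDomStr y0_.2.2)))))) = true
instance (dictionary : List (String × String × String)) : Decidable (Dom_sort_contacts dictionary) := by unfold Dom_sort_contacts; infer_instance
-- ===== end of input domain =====

-- B replaces build-all-then-list.sort() by an incremental insertion sort kept sorted at all times (alternative decomposition, same values).
-- The association-list argument models a Python dict: keys iterate in first-occurrence order, lookup is the first binding.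

-- dictionary[key]: first binding for `key` (total form; every key passed to it occurs in the list)
def pvVal (dictionary : List (String × String × String)) (key : String) : String × String :=
  ((dictionary.find? (fun p => p.1 == key)).map (fun p => p.2)).getD ("", "")

-- ===== PORT A =====
-- `for key in dictionary` iterates the dict's keys: first occurrences, in order.
-- The tuples appended have pairwise-distinct first components, so Python's lexicographic
-- tuple sort of new_list coincides with the stable sort by the first component used here.
def sort_contacts (dictionary : List (String × String × String)) : List (String × String × String) :=
  let new_list :=
    (PySem.List.dedup (dictionary.map (fun p => p.1))).foldl
      (fun acc key =>
        let v := pvVal dictionary key   -- var1, var2 = dictionary[key]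
        acc ++ [(key, v.1, v.2)]) []
  PySem.List.sorted new_list (fun t => t.1) false

-- ===== PORT B =====
-- Python `result[i] < item`: lexicographic tuple comparison (strict string compare componentwise)
def pvLtT (a b : String × String × String) : Bool :=
  decide (a.1 < b.1) || (a.1 == b.1 && (decide (a.2.1 < b.2.1) || (a.2.1 == b.2.1 && decide (a.2.2 < b.2.2))))

-- the `while i < len(result) and result[i] < item` scan followed by `result.insert(i, item)`:
-- walk past the elements < item, put item right there
def pvInsert (item : String × String × String) :
    List (String × String × String) → List (String × String × String)
  | [] => [item]
  | x :: xs => if pvLtT x item then x :: pvInsert item xs else item :: x :: xs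

def sort_contacts_alt (dictionary : List (String × String × String)) : List (String × String × String) :=
  (PySem.List.dedup (dictionary.map (fun p => p.1))).foldl
    (fun result key =>
      let v := pvVal dictionary key   -- var1, var2 = dictionary[key]
      pvInsert (key, v.1, v.2) result) []

-- ===== PRECONDITION & SPEC =====
def Spec_sort_contacts (dictionary : List (String × String × String)) (out : List (String × String × String)) : Prop := out = sort_contacts_alt dictionary
instance (dictionary : List (String × String × String)) (out : List (String × String × String)) : Decidable (Spec_sort_contacts dictionary out) := by unfold Spec_sort_contacts; infer_instance

-- ===== CLAIM (what is proved, stated in full; the proofs are below) =====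
def Claim_equal_sort_contacts : Prop := ∀ (dictionary : List (String × String × String)), Dom_sort_contacts dictionary → Spec_sort_contacts dictionary (sort_contacts dictionary)

-- ===== LEMMAS AND PROOFS =====

theorem pvInsert_perm (t : String × String × String) (l : List (String × String × String)) :
    (pvInsert t l).Perm (t :: l) := by
  induction l with
  | nil => simp [pvInsert]
  | cons x xs ih =>
    by_cases h : pvLtT x t
    · simpa [pvInsert, h] using ((ih.cons x).trans (List.Perm.swap t x xs))
    · simp [pvInsert, h]

theorem mem_pvInsert {y t : String × String × String} {l : List (String × String × String)}
    (h : y ∈ pvInsert t l) : y = t ∨ y ∈ l := by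
  have := (pvInsert_perm t l).mem_iff.mp h
  simpa using this

theorem pvLtT_of_ne {x t : String × String × String} (h : x.1 ≠ t.1) :
    pvLtT x t = decide (x.1 < t.1) := by
  simp [pvLtT, h]

theorem pvInsert_pairwise {t : String × String × String} {l : List (String × String × String)}
    (hp : l.Pairwise (fun a b => a.1 < b.1)) (hne : ∀ x ∈ l, x.1 ≠ t.1) :
    (pvInsert t l).Pairwise (fun a b => a.1 < b.1) := by
  induction l with
  | nil => simp [pvInsert]
  | cons x xs ih =>
    rcases List.pairwise_cons.mp hp with ⟨hx, hxs⟩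
    have hxne : x.1 ≠ t.1 := hne x (by simp)
    by_cases h : pvLtT x t = true
    · have hxlt : x.1 < t.1 := by
        have := (pvLtT_of_ne hxne) ▸ h
        exact of_decide_eq_true this
      have := ih hxs (fun y hy => hne y (by simp [hy]))
      simp only [pvInsert, h, if_true]
      refine List.pairwise_cons.mpr ⟨?_, this⟩
      intro y hy
      rcases mem_pvInsert hy with rfl | hy'
      · exact hxlt
      · exact hx y hy'
    · have htlt : t.1 < x.1 := by
        have hnlt : ¬ x.1 < t.1 := by
          intro hc
          exact h ((pvLtT_of_ne hxne).trans (decide_eq_true hc))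
        exact lt_of_le_of_ne (le_of_not_gt hnlt) (Ne.symm hxne)
      simp only [pvInsert, h, if_false, Bool.false_eq_true]
      refine List.pairwise_cons.mpr ⟨?_, hp⟩
      intro y hy
      rcases List.mem_cons.mp hy with rfl | hy'
      · exact htlt
      · exact lt_trans htlt (hx y hy')

theorem foldl_pvInsert_perm (ts acc : List (String × String × String)) :
    (ts.foldl (fun res t => pvInsert t res) acc).Perm (ts ++ acc) := by
  induction ts generalizing acc with
  | nil => simp
  | cons t ts ih =>
    have h1 : (ts.foldl (fun res t => pvInsert t res) (pvInsert t acc)).Perm (ts ++ pvInsert t acc) := ih _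
    have h2 : (ts ++ pvInsert t acc).Perm (ts ++ (t :: acc)) := (pvInsert_perm t acc).append_left ts
    have h3 : (ts ++ (t :: acc)).Perm (t :: (ts ++ acc)) := List.perm_middle
    exact ((h1.trans h2).trans h3)

theorem foldl_pvInsert_pairwise (ts : List (String × String × String)) :
    ∀ acc : List (String × String × String),
      ((acc ++ ts).map (fun p => p.1)).Nodup →
      acc.Pairwise (fun a b => a.1 < b.1) →
      (ts.foldl (fun res t => pvInsert t res) acc).Pairwise (fun a b => a.1 < b.1) := by
  induction ts with
  | nil => intro acc _ hp; simpa using hp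
  | cons t ts ih =>
    intro acc hnd hp
    have hperm : (pvInsert t acc ++ ts).Perm (acc ++ t :: ts) := by
      have h1 : (pvInsert t acc ++ ts).Perm ((t :: acc) ++ ts) := (pvInsert_perm t acc).append_right ts
      exact h1.trans List.perm_middle.symm
    have hnd' : ((pvInsert t acc ++ ts).map (fun p => p.1)).Nodup :=
      ((hperm.map (fun p => p.1)).nodup_iff).mpr hnd
    have hne : ∀ x ∈ acc, x.1 ≠ t.1 := by
      intro x hx heq
      have h1 : x.1 ∈ acc.map (fun p => p.1) := List.mem_map_of_mem hx
      have := (List.nodup_append.mp (by simpa using hnd)).2.2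
      exact this x.1 h1 t.1 (by simp) heq
    exact ih (pvInsert t acc) hnd' (pvInsert_pairwise hp hne)

-- ===== VERDICT (by name: the statement is the Claim_ definition above) =====
theorem sort_contacts_spec : Claim_equal_sort_contacts := by
  intro dictionary _
  unfold Spec_sort_contacts sort_contacts sort_contacts_alt
  simp only []
  set ks := PySem.List.dedup (dictionary.map (fun p => p.1)) with hks
  set f : String → String × String × String :=
    fun key => (key, (pvVal dictionary key).1, (pvVal dictionary key).2) with hf
  have hA : ks.foldl (fun acc key =>
      let v := pvVal dictionary key
      acc ++ [(key, v.1, v.2)]) [] = ks.map f := by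
    simpa [hf] using PySem.List.foldl_append_singleton_eq_map (l := ks) (f := f) (acc := [])
  have hB : ks.foldl (fun result key =>
      let v := pvVal dictionary key
      pvInsert (key, v.1, v.2) result) []
      = (ks.map f).foldl (fun res t => pvInsert t res) [] := by
    rw [List.foldl_map]
  rw [hA, hB]
  have hndk : ks.Nodup := PySem.List.nodup_dedup _
  have hnd : ((ks.map f).map (fun p => p.1)).Nodup := by
    have : (ks.map f).map (fun p => p.1) = ks := by
      simp [hf, List.map_map, Function.comp_def]
    rw [this]; exact hndk
  apply PySem.List.sorted_eq_of_perm_of_pairwise_lt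
  · simpa using foldl_pvInsert_perm (ks.map f) []
  · exact foldl_pvInsert_pairwise (ks.map f) [] (by simpa using hnd) (by simp)
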